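-- pv_equiv track=rewrite | github.com/hecong520/kuaishang_auto | algorithm/algorithm_func.py | get_result_prob
-- ===== SOURCE A (Python) =====
-- def get_result_prob(lb_list1, lb_list2, point):
--     n = 0
--     fn = 0
--     tp = 0
--     fp = 0
--     tn = 0
--     for i in range(0, len(lb_list1)):
--         n = n + 1
--         if point in lb_list1[i]:
--             if lb_list1[i] == lb_list2[i]:
--                 tp = tp + 1
--             elif point in lb_list2[i]:
--                 fp = fp + 1
--                 fn = fn + 1
--             else:
--                 fn = fn + 1
--         elif point in lb_list2[i]:
--             if lb_list1[i] != lb_list2[i]: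
--                 fp = fp + 1
--         else:
--             tn = tn + 1
--     return tp, fp, fn, tn, n
-- ===== SOURCE B (Python) =====
-- def get_result_prob(lb_list1, lb_list2, point):
--     n = len(lb_list1)
--     flags = [(point in lb_list1[i], point in lb_list2[i], lb_list1[i] == lb_list2[i])
--              for i in range(n)]
--     tp = sum(1 for a, b, eq in flags if a and eq)
--     fn = sum(1 for a, b, eq in flags if a and not eq)
--     fp = sum(1 for a, b, eq in flags if b and not eq)
--     tn = sum(1 for a, b, eq in flags if not a and not b)
--     return tp, fp, fn, tn, n
-- ===== Notes on version B (the rewrite author's own statement) =====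
-- stated objective: simpler
-- what changed: Replaces the single stateful loop with nested if/elif branches by computing per-index flags (a=point in lb1[i], b=point in lb2[i], eq=lb1[i]==lb2[i]) once and deriving tp/fn/fp/tn as four independent counts over simplified closed predicates (fp collapses to 'b and not eq').
import Mathlib
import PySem

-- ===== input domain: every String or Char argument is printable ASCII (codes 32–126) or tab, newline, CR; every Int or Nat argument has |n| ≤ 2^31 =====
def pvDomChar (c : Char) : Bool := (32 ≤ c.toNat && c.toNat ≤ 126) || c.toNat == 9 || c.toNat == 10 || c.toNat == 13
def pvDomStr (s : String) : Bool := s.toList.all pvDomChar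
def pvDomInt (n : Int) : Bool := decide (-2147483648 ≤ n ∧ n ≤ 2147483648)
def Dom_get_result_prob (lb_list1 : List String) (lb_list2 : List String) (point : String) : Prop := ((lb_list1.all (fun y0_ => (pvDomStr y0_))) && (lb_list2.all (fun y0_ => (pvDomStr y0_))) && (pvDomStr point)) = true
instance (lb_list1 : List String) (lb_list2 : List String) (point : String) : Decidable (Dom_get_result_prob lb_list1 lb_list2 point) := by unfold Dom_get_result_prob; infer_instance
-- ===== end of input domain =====

-- B replaces A's single branching stateful loop by four independent flat predicate counts
-- over per-index flags (objective: simpler). Equality proved on Pre_ (len lb1 ≤ len lb2; A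
-- raises IndexError otherwise, and so does B).

-- ===== PORT A =====
def get_result_prob (lb_list1 : List String) (lb_list2 : List String) (point : String) : Int × Int × Int × Int × Int :=
  -- n, fn, tp, fp, tn in Python's initialization order; loop over range(0, len(lb_list1))
  let r := (PySem.List.pyRange 0 (lb_list1.length : Int) 1).foldl
    (fun (acc : Int × Int × Int × Int × Int) (i : Int) =>
      let s1 := PySem.List.pyGetD lb_list1 i ""
      let s2 := PySem.List.pyGetD lb_list2 i ""
      let n := acc.1 + 1
      let fn := acc.2.1
      let tp := acc.2.2.1
      let fp := acc.2.2.2.1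
      let tn := acc.2.2.2.2
      if PySem.Str.isIn point s1 then
        if s1 == s2 then (n, fn, tp + 1, fp, tn)
        else if PySem.Str.isIn point s2 then (n, fn + 1, tp, fp + 1, tn)
        else (n, fn + 1, tp, fp, tn)
      else if PySem.Str.isIn point s2 then
        if !(s1 == s2) then (n, fn, tp, fp + 1, tn)
        else (n, fn, tp, fp, tn)
      else (n, fn, tp, fp, tn + 1))
    (0, 0, 0, 0, 0)
  (r.2.2.1, r.2.2.2.1, r.2.1, r.2.2.2.2, r.1)

-- ===== PORT B =====
-- the triple (a, b, eq) at index i, exactly Source B's comprehension element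
def pvFlagAt (lb_list1 : List String) (lb_list2 : List String) (point : String) (i : Int) : Bool × Bool × Bool :=
  (PySem.Str.isIn point (PySem.List.pyGetD lb_list1 i ""),
   PySem.Str.isIn point (PySem.List.pyGetD lb_list2 i ""),
   PySem.List.pyGetD lb_list1 i "" == PySem.List.pyGetD lb_list2 i "")

def get_result_prob_alt (lb_list1 : List String) (lb_list2 : List String) (point : String) : Int × Int × Int × Int × Int :=
  let n : Int := (lb_list1.length : Int)
  let flags := (PySem.List.pyRange 0 n 1).map (pvFlagAt lb_list1 lb_list2 point)
  let tp : Int := (flags.countP fun t => t.1 && t.2.2 : Nat)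
  let fn : Int := (flags.countP fun t => t.1 && !t.2.2 : Nat)
  let fp : Int := (flags.countP fun t => t.2.1 && !t.2.2 : Nat)
  let tn : Int := (flags.countP fun t => !t.1 && !t.2.1 : Nat)
  (tp, fp, fn, tn, n)

-- ===== PRECONDITION & SPEC =====
-- Pre_ excludes exactly the inputs on which Python A raises IndexError (lb_list2 shorter than
-- lb_list1); B raises there too.
def Pre_get_result_prob (lb_list1 : List String) (lb_list2 : List String) (point : String) : Prop :=
  lb_list1.length ≤ lb_list2.length
instance (lb_list1 : List String) (lb_list2 : List String) (point : String) : Decidable (Pre_get_result_prob lb_list1 lb_list2 point) := by unfold Pre_get_result_prob; infer_instance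

def pvWitness_get_result_prob : List String × List String × String := (["a", "b"], ["a", "c"], "a")

def Spec_get_result_prob (lb_list1 : List String) (lb_list2 : List String) (point : String) (out : Int × Int × Int × Int × Int) : Prop := out = get_result_prob_alt lb_list1 lb_list2 point
instance (lb_list1 : List String) (lb_list2 : List String) (point : String) (out : Int × Int × Int × Int × Int) : Decidable (Spec_get_result_prob lb_list1 lb_list2 point out) := by unfold Spec_get_result_prob; infer_instance

-- ===== CLAIM (what is proved, stated in full; the proofs are below) =====
def Claim_equal_get_result_prob : Prop := ∀ (lb_list1 : List String) (lb_list2 : List String) (point : String), Dom_get_result_prob lb_list1 lb_list2 point → Pre_get_result_prob lb_list1 lb_list2 point → Spec_get_result_prob lb_list1 lb_list2 point (get_result_prob lb_list1 lb_list2 point)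

-- ===== LEMMAS AND PROOFS =====

-- A's loop body, as a function of the flag triple (a, b, eq)
def pvStep (acc : Int × Int × Int × Int × Int) (t : Bool × Bool × Bool) : Int × Int × Int × Int × Int :=
  let n := acc.1 + 1
  let fn := acc.2.1
  let tp := acc.2.2.1
  let fp := acc.2.2.2.1
  let tn := acc.2.2.2.2
  if t.1 then
    if t.2.2 then (n, fn, tp + 1, fp, tn)
    else if t.2.1 then (n, fn + 1, tp, fp + 1, tn)
    else (n, fn + 1, tp, fp, tn)
  else if t.2.1 then
    if !t.2.2 then (n, fn, tp, fp + 1, tn)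
    else (n, fn, tp, fp, tn)
  else (n, fn, tp, fp, tn + 1)

-- A's branching fold over any flag list equals four independent counts plus the length
lemma pvFold_counts (flags : List (Bool × Bool × Bool)) (n fn tp fp tn : Int) :
    flags.foldl pvStep (n, fn, tp, fp, tn) =
      (n + (flags.length : Int),
       fn + (flags.countP fun t => t.1 && !t.2.2 : Nat),
       tp + (flags.countP fun t => t.1 && t.2.2 : Nat),
       fp + (flags.countP fun t => t.2.1 && !t.2.2 : Nat),
       tn + (flags.countP fun t => !t.1 && !t.2.1 : Nat)) := by
  induction flags generalizing n fn tp fp tn with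
  | nil => simp
  | cons t rest ih =>
    obtain ⟨a, b, e⟩ := t
    cases a <;> cases b <;> cases e <;>
      simp [List.foldl_cons, pvStep, ih] <;> omega

-- ===== VERDICT (by name: the statement is the Claim_ definition above) =====

theorem get_result_prob_spec : Claim_equal_get_result_prob := by
  intro lb_list1 lb_list2 point _ _
  unfold Spec_get_result_prob get_result_prob get_result_prob_alt
  have hbody : (fun (acc : Int × Int × Int × Int × Int) (i : Int) =>
      let s1 := PySem.List.pyGetD lb_list1 i ""
      let s2 := PySem.List.pyGetD lb_list2 i ""
      let n := acc.1 + 1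
      let fn := acc.2.1
      let tp := acc.2.2.1
      let fp := acc.2.2.2.1
      let tn := acc.2.2.2.2
      if PySem.Str.isIn point s1 then
        if s1 == s2 then (n, fn, tp + 1, fp, tn)
        else if PySem.Str.isIn point s2 then (n, fn + 1, tp, fp + 1, tn)
        else (n, fn + 1, tp, fp, tn)
      else if PySem.Str.isIn point s2 then
        if !(s1 == s2) then (n, fn, tp, fp + 1, tn)
        else (n, fn, tp, fp, tn)
      else (n, fn, tp, fp, tn + 1)) =
      (fun acc i => pvStep acc (pvFlagAt lb_list1 lb_list2 point i)) := rfl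
  rw [hbody, ← List.foldl_map, pvFold_counts]
  simp [PySem.List.length_pyRange_one]
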